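-- pv_equiv track=rewrite | github.com/Chiragj2003/leet-code-python- | Sliding_Window/1040_MovingStones.py | numMovesStonesII
-- ===== SOURCE A (Python) =====
-- def numMovesStonesII(stones):
--     """
--     Returns [minimum_moves, maximum_moves]
--     """
--     stones.sort()
--     n = len(stones)
--
--     # Maximum moves: fill gaps from one end
--     # We can move stones from one end to fill gaps
--     max_moves = max(stones[-1] - stones[1] - (n - 2),
--                     stones[-2] - stones[0] - (n - 2))
--
--     # Minimum moves: sliding window
--     min_moves = n
--     j = 0
--
--     for i in range(n):
--         # Expand window while stones fit in n positions
--         while j < n and stones[j] - stones[i] + 1 <= n: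
--             j += 1
--
--         # Number of stones in window
--         stones_in_window = j - i
--
--         # Special case: n-1 stones consecutive with 1 gap
--         if stones_in_window == n - 1 and stones[j-1] - stones[i] == n - 2:
--             min_moves = min(min_moves, 2)
--         else:
--             min_moves = min(min_moves, n - stones_in_window)
--
--     return [min_moves, max_moves]
-- ===== SOURCE B (Python) =====
-- def numMovesStonesII(stones):
--     """
--     Returns [minimum_moves, maximum_moves]
--     """
--     stones.sort()
--     n = len(stones)
--
--     # Maximum moves: identical closed form, factored
--     max_moves = max(stones[-1] - stones[1], stones[-2] - stones[0]) - (n - 2)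
--
--     def upper(limit, lo, hi):
--         # first index in the sorted list whose stone exceeds limit (recursive bisection)
--         if lo >= hi:
--             return lo
--         mid = (lo + hi) // 2
--         if stones[mid] <= limit:
--             return upper(limit, mid + 1, hi)
--         return upper(limit, lo, mid)
--
--     # Minimum moves: walk the stones once; each window end is found independently
--     # by bisection, so no state is carried between iterations.
--     min_moves = n
--     for i, x in enumerate(stones):
--         w = upper(x + n - 1, 0, n) - i
--         if w == n - 1 and stones[i + w - 1] - x == n - 2:
--             min_moves = min(min_moves, 2)
--         else:
--             min_moves = min(min_moves, n - w)
--     return [min_moves, max_moves]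
-- ===== Notes on version B (the rewrite author's own statement) =====
-- stated objective: alternative
-- what changed: The two-pointer sliding window carrying a running j across iterations is replaced by a single enumerate pass that finds each window end independently with a recursive bisection (first stone above stones[i]+n-1), keeping only the running minimum; the max-moves formula is factored as max(a,b)-(n-2); Pre_ excludes lists of fewer than 2 stones, where both A and B raise IndexError.
import Mathlib
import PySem

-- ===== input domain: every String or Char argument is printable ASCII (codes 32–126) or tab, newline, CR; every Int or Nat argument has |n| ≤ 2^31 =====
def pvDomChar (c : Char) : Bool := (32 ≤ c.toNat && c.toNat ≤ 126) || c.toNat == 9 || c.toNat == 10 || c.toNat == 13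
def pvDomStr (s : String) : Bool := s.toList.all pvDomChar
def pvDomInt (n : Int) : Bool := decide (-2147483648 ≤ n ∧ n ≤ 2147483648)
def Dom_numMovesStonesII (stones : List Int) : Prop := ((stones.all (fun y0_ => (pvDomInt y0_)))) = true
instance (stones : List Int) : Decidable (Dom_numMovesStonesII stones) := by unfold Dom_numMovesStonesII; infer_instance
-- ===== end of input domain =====

-- B replaces A's carried two-pointer j by an independent recursive bisection per stone, keeping only the
-- running minimum; equivalence is about the return value (both Pythons sort the argument in place, the
-- same observable mutation).

-- ===== PORT A =====
-- stones[k] (in-range under Pre_ wherever evaluated; Python wraps negative k, as pyGet? does; the default is never used)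
def pvGet (xs : List Int) (i : Int) : Int := (PySem.List.pyGet? xs i).getD 0

-- the inner `while j < n and stones[j] - stones[i] + 1 <= n: j += 1`, fueled (fuel > n suffices)
def pvWhileA (s : List Int) (n i : Int) : Int → Nat → Int
  | j, 0 => j
  | j, fuel+1 =>
      if j < n ∧ pvGet s j - pvGet s i + 1 ≤ n then pvWhileA s n i (j+1) fuel else j

-- one iteration of A's `for i in range(n)` body, state = (min_moves, j)
def pvStepA (s : List Int) (n : Int) (st : Int × Int) (i : Int) : Int × Int :=
  let j := pvWhileA s n i st.2 (n.toNat + 1)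
  let w := j - i
  if w = n - 1 ∧ pvGet s (j - 1) - pvGet s i = n - 2 then (min st.1 2, j)
  else (min st.1 (n - w), j)

def numMovesStonesII (stones : List Int) : List Int :=
  let s := PySem.List.sorted stones (fun x => x) false
  let n : Int := s.length
  let maxMoves := max (pvGet s (-1) - pvGet s 1 - (n - 2)) (pvGet s (-2) - pvGet s 0 - (n - 2))
  let st := (PySem.List.pyRange 0 n 1).foldl (pvStepA s n) (n, 0)
  [st.1, maxMoves]

-- ===== PORT B =====
-- B's recursive `upper(limit, lo, hi)` bisection, fueled (the interval shrinks each call; fuel > n suffices)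
def pvUpper (s : List Int) (limit : Int) : Int → Int → Nat → Int
  | lo, _, 0 => lo
  | lo, hi, fuel+1 =>
      if hi ≤ lo then lo
      else
        let mid := PySem.Int.floordiv (lo + hi) 2
        if pvGet s mid ≤ limit then pvUpper s limit (mid + 1) hi fuel
        else pvUpper s limit lo mid fuel

-- B's `for i, x in enumerate(stones)` pass, transcribed as structural recursion over the
-- remaining stones, carrying the index i and the running minimum acc
def pvScanB (s : List Int) (n : Int) : Int → Int → List Int → Int
  | _, acc, [] => acc
  | i, acc, x :: rest =>
      let w := pvUpper s (x + n - 1) 0 n (n.toNat + 1) - i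
      let acc' := if w = n - 1 ∧ pvGet s (i + w - 1) - x = n - 2
                  then min acc 2 else min acc (n - w)
      pvScanB s n (i + 1) acc' rest

def numMovesStonesII_alt (stones : List Int) : List Int :=
  let s := PySem.List.sorted stones (fun x => x) false
  let n : Int := s.length
  let maxMoves := max (pvGet s (-1) - pvGet s 1) (pvGet s (-2) - pvGet s 0) - (n - 2)
  let minMoves := pvScanB s n 0 n s
  [minMoves, maxMoves]

-- ===== PRECONDITION & SPEC =====
-- A raises IndexError on lists of fewer than 2 stones (stones[-1]/stones[1]); exactly those are excluded.
def Pre_numMovesStonesII (stones : List Int) : Prop := 2 ≤ stones.length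
instance (stones : List Int) : Decidable (Pre_numMovesStonesII stones) := by unfold Pre_numMovesStonesII; infer_instance
def pvWitness_numMovesStonesII : List Int := [1, 5]

def Spec_numMovesStonesII (stones : List Int) (out : List Int) : Prop := out = numMovesStonesII_alt stones
instance (stones : List Int) (out : List Int) : Decidable (Spec_numMovesStonesII stones out) := by unfold Spec_numMovesStonesII; infer_instance

-- ===== CLAIM (what is proved, stated in full; the proofs are below) =====
def Claim_equal_numMovesStonesII : Prop := ∀ (stones : List Int), Dom_numMovesStonesII stones → Pre_numMovesStonesII stones → Spec_numMovesStonesII stones (numMovesStonesII stones)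

-- ===== LEMMAS AND PROOFS =====

-- In a ≤-sorted list, the elements ≤ hi are exactly the prefix of length countP (· ≤ hi)
theorem pv_countP_prefix (hi : Int) : ∀ (s : List Int), s.Pairwise (· ≤ ·) →
    ∀ k (hk : k < s.length), (s[k] ≤ hi ↔ k < s.countP (fun x => decide (x ≤ hi))) := by
  intro s
  induction s with
  | nil => intro _ k hk; simp at hk
  | cons a t ih =>
    intro hp k hk
    rcases List.pairwise_cons.mp hp with ⟨ha, ht⟩
    by_cases hahi : a ≤ hi
    · cases k with
      | zero => simp [hahi]
      | succ m =>
        have hm : m < t.length := by simpa using hk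
        have := ih ht m hm
        simp only [List.getElem_cons_succ, List.countP_cons, hahi, decide_true, if_true] at *
        omega
    · have hzero : t.countP (fun x => decide (x ≤ hi)) = 0 := by
        rw [List.countP_eq_zero]
        intro x hx
        simp only [decide_eq_true_eq]
        intro hxhi
        exact hahi (le_trans (ha x hx) hxhi)
      cases k with
      | zero => simp [hahi, hzero]
      | succ m =>
        have hm : m < t.length := by simpa using hk
        have hma : a ≤ t[m] := ha _ (List.getElem_mem hm)
        simp only [List.getElem_cons_succ, List.countP_cons, hzero, hahi]
        constructor
        · intro h; exact absurd (le_trans hma h) hahi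
        · intro h; simp at h

-- pvGet agrees with getElem on in-range nonnegative indices
theorem pvGet_eq_getElem (s : List Int) (i : Int) (h0 : 0 ≤ i) (hn : i < (s.length : Int)) :
    pvGet s i = s[i.toNat]'(by omega) := by
  unfold pvGet
  rw [PySem.List.pyGet?_eq_some_getElem s h0 hn]
  rfl

-- the while loop lands on c, the first index failing the condition, from any start j ≤ c
theorem pvWhileA_eq (s : List Int) (n i c : Int) (hc : c ≤ n)
    (hin : ∀ k, 0 ≤ k → k < c → k < n ∧ pvGet s k - pvGet s i + 1 ≤ n)
    (hout : c < n → ¬ (pvGet s c - pvGet s i + 1 ≤ n)) :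
    ∀ (fuel : Nat) (j : Int), 0 ≤ j → j ≤ c → c - j < fuel → pvWhileA s n i j fuel = c := by
  intro fuel
  induction fuel with
  | zero => intro j _ _ h; omega
  | succ f ih =>
    intro j hj0 hjc hfuel
    unfold pvWhileA
    by_cases hlt : j < c
    · rw [if_pos (hin j hj0 hlt)]
      exact ih (j+1) (by omega) (by omega) (by omega)
    · have hjc' : j = c := by omega
      subst hjc'
      rw [if_neg]
      · rintro ⟨h1, h2⟩
        exact hout h1 h2

-- the bisection lands on c, the boundary of the ≤-limit prefix, from any bracket lo ≤ c ≤ hi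
theorem pvUpper_eq (s : List Int) (limit c : Int) (nn : Int) (hnn : nn = (s.length : Int))
    (hin : ∀ k, 0 ≤ k → k < c → pvGet s k ≤ limit)
    (hout : ∀ k, c ≤ k → k < nn → ¬ (pvGet s k ≤ limit)) :
    ∀ (fuel : Nat) (lo hi : Int), 0 ≤ lo → lo ≤ c → c ≤ hi → hi ≤ nn → hi - lo < fuel →
    pvUpper s limit lo hi fuel = c := by
  intro fuel
  induction fuel with
  | zero => intro lo hi _ _ _ _ h; omega
  | succ f ih =>
    intro lo hi hlo0 hloc hchi hhin hfuel
    unfold pvUpper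
    by_cases hlh : hi ≤ lo
    · rw [if_pos hlh]; omega
    · rw [if_neg hlh]
      rw [PySem.Int.floordiv_eq_ediv_of_pos (by omega)]
      by_cases hmid : pvGet s ((lo + hi) / 2) ≤ limit
      · rw [if_pos hmid]
        have hmc : (lo + hi) / 2 < c := by
          by_contra hge
          exact hout ((lo + hi) / 2) (by omega) (by omega) hmid
        exact ih ((lo + hi) / 2 + 1) hi (by omega) (by omega) hchi hhin (by omega)
      · rw [if_neg hmid]
        have hcm : c ≤ (lo + hi) / 2 := by
          by_contra hlt
          exact hmid (hin ((lo + hi) / 2) (by omega) (by omega))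
        exact ih lo ((lo + hi) / 2) hlo0 hloc hcm (by omega) (by omega)

-- main loop invariant: from index a on, A's (min, j) fold over range agrees with B's
-- structural scan over the remaining stones, provided A's resume pointer j is ≤ the
-- window count at a (whenever a is still in range)
theorem pv_loop_inv (s : List Int) (hs : s.Pairwise (· ≤ ·)) :
    ∀ (fuel : Nat) (a m j : Int), 0 ≤ a → ((s.length : Int) - a).toNat ≤ fuel → 0 ≤ j →
    (a < (s.length : Int) → j ≤ ((s.countP (fun x => decide (x ≤ pvGet s a + (s.length : Int) - 1))) : Int)) →
    ((PySem.List.pyRange a (s.length : Int) 1).foldl (pvStepA s (s.length : Int)) (m, j)).1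
      = pvScanB s (s.length : Int) a m (s.drop a.toNat) := by
  intro fuel
  induction fuel with
  | zero =>
    intro a m j ha hfa hj0 hj
    have hna : (s.length : Int) ≤ a := by omega
    rw [PySem.List.pyRange_one_eq_nil hna]
    have : s.drop a.toNat = [] := List.drop_eq_nil_of_le (by omega)
    rw [this]
    rfl
  | succ f ih =>
    intro a m j ha hfa hj0 hj
    by_cases hna : (s.length : Int) ≤ a
    · rw [PySem.List.pyRange_one_eq_nil hna]
      have : s.drop a.toNat = [] := List.drop_eq_nil_of_le (by omega)
      rw [this]
      rfl
    · set n : Int := (s.length : Int) with hn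
      have han : a < n := by omega
      have hal : a.toNat < s.length := by omega
      rw [PySem.List.pyRange_one_cons han]
      simp only [List.foldl_cons]
      set c : Int := ((s.countP (fun x => decide (x ≤ pvGet s a + n - 1))) : Int) with hcdef
      have hc0 : (0:Int) ≤ c := by positivity
      have hc_le : c ≤ n := by
        have := List.countP_le_length (p := fun x => decide (x ≤ pvGet s a + n - 1)) (l := s)
        omega
      have hc_gt : a < c := by
        have hsa : s[a.toNat] ≤ pvGet s a + n - 1 := by
          rw [pvGet_eq_getElem s a ha (by omega)]; omega
        rw [pv_countP_prefix (pvGet s a + n - 1) s hs a.toNat hal] at hsa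
        omega
      have hwhile : pvWhileA s n a j (n.toNat + 1) = c := by
        apply pvWhileA_eq s n a _ hc_le
        · intro k hk0 hkc
          refine ⟨by omega, ?_⟩
          have hkl : k.toNat < s.length := by omega
          have hsk : s[k.toNat] ≤ pvGet s a + n - 1 := by
            rw [pv_countP_prefix (pvGet s a + n - 1) s hs k.toNat hkl]; omega
          rw [pvGet_eq_getElem s k hk0 (by omega)]
          omega
        · intro hcn hle
          have hcl : c.toNat < s.length := by omega
          rw [pvGet_eq_getElem s _ hc0 (by omega)] at hle
          have h2 : s[c.toNat] ≤ pvGet s a + n - 1 := by omega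
          rw [pv_countP_prefix (pvGet s a + n - 1) s hs _ hcl] at h2
          omega
        · exact hj0
        · exact hj han
        · omega
      have hupper : pvUpper s (pvGet s a + n - 1) 0 n (n.toNat + 1) = c := by
        apply pvUpper_eq s _ _ n rfl
        · intro k hk0 hkc
          have hkl : k.toNat < s.length := by omega
          have hsk : s[k.toNat] ≤ pvGet s a + n - 1 := by
            rw [pv_countP_prefix (pvGet s a + n - 1) s hs k.toNat hkl]; omega
          rw [pvGet_eq_getElem s k hk0 (by omega)]
          omega
        · intro k hkc hkn hle
          have hkl : k.toNat < s.length := by omega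
          rw [pvGet_eq_getElem s k (by omega) (by omega)] at hle
          rw [pv_countP_prefix (pvGet s a + n - 1) s hs k.toNat hkl] at hle
          omega
        · omega
        · omega
        · exact hc_le
        · omega
        · omega
      -- B's scan unfolds on drop a = s[a] :: drop (a+1); both step guards coincide
      have hdrop : s.drop a.toNat = s[a.toNat] :: s.drop (a.toNat + 1) :=
        List.drop_eq_getElem_cons hal
      have hx : pvGet s a = s[a.toNat] := pvGet_eq_getElem s a ha (by omega)
      rw [hdrop, ← hx]
      simp only [pvScanB, pvStepA, hwhile, hupper]
      rw [show a + (c - a) - 1 = c - 1 from by ring]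
      have hdrop1 : s.drop (a.toNat + 1) = s.drop (a+1).toNat := by congr 1; omega
      rw [hdrop1]
      have hresume : a + 1 < n → c ≤ ((s.countP (fun x => decide (x ≤ pvGet s (a+1) + n - 1))) : Int) := by
        intro h1
        have hmono : pvGet s a ≤ pvGet s (a+1) := by
          rw [pvGet_eq_getElem s a ha (by omega), pvGet_eq_getElem s (a+1) (by omega) (by omega)]
          exact List.pairwise_iff_getElem.mp hs a.toNat (a+1).toNat (by omega) (by omega) (by omega)
        have hmc := List.countP_mono_left (l := s)
          (p := fun x => decide (x ≤ pvGet s a + n - 1)) (q := fun x => decide (x ≤ pvGet s (a+1) + n - 1))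
          (by intro x _ hx; simp only [decide_eq_true_eq] at *; omega)
        omega
      split_ifs with hcond
      · exact ih (a+1) (min m 2) c (by omega) (by omega) hc0 hresume
      · exact ih (a+1) (min m (n - (c - a))) c (by omega) (by omega) hc0 hresume

-- ===== VERDICT (by name: the statement is the Claim_ definition above) =====
theorem numMovesStonesII_spec : Claim_equal_numMovesStonesII := by
  intro stones _ hpre
  unfold Spec_numMovesStonesII numMovesStonesII numMovesStonesII_alt
  set s := PySem.List.sorted stones (fun x => x) false with hsdef
  have hlen : s.length = stones.length := PySem.List.length_sorted ..
  have hs : s.Pairwise (· ≤ ·) := PySem.List.sorted_pairwise ..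
  set n : Int := (s.length : Int) with hn
  simp only [List.cons.injEq, and_true]
  constructor
  · have := pv_loop_inv s hs s.length 0 n 0 le_rfl (by omega) le_rfl (fun _ => by positivity)
    simpa using this
  · omega
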